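-- pv_equiv track=rewrite | github.com/ogorodnikov/Pycheck | Other/unfair_dice.py | m_wins
-- ===== SOURCE A (Python) =====
-- from itertools import product
--
-- def m_wins(o_dice, m_dice):
--     o_score = 0
--     for o_side, m_side in product(o_dice, m_dice):
--         if o_side > m_side:
--             o_score += 1
--         elif o_side < m_side:
--             o_score -= 1
--
--     return o_score < 0
-- ===== SOURCE B (Python) =====
-- from bisect import bisect_left, bisect_right
--
-- def m_wins(o_dice, m_dice):
--     ms = sorted(m_dice)
--     n = len(ms)
--     o_score = 0
--     for o in o_dice:
--         # m-sides strictly below o (o wins) minus m-sides strictly above o (o loses)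
--         o_score += bisect_left(ms, o) - (n - bisect_right(ms, o))
--     return o_score < 0
-- ===== Notes on version B (the rewrite author's own statement) =====
-- stated objective: faster
-- what changed: Instead of comparing every (o_side, m_side) pair, B sorts m_dice once and uses binary search (bisect_left/bisect_right) per o_side to count smaller and larger m-sides.
import Mathlib
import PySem

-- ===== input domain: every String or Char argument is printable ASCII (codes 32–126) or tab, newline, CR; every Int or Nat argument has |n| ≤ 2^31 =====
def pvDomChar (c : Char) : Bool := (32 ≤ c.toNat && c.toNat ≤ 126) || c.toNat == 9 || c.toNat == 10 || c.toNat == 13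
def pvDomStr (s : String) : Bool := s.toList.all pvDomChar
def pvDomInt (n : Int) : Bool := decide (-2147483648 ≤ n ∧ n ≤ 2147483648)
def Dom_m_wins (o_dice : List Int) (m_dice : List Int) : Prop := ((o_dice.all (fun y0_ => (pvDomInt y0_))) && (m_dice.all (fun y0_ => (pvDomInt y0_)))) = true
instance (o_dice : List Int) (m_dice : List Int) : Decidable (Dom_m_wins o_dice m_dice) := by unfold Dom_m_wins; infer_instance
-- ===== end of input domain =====

-- B replaces A's all-pairs comparison loop by sorting m_dice once and binary-searching
-- (bisect) each o_side, for an asymptotically faster count of smaller/larger m-sides.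

-- ===== PORT A =====
-- for o_side, m_side in product(o_dice, m_dice): the row-major double loop
def m_wins (o_dice : List Int) (m_dice : List Int) : Bool :=
  let o_score : Int :=
    o_dice.foldl (fun s o_side =>
      m_dice.foldl (fun s m_side =>
        if o_side > m_side then s + 1
        else if o_side < m_side then s - 1
        else s) s) 0
  decide (o_score < 0)

-- ===== PORT B =====
def m_wins_alt (o_dice : List Int) (m_dice : List Int) : Bool :=
  let ms := PySem.List.sorted m_dice (fun x => x)
  let n : Int := ms.length
  let o_score : Int :=
    o_dice.foldl (fun s o =>
      s + ((PySem.List.bisectLeft ms o : Int) - (n - (PySem.List.bisectRight ms o : Int)))) 0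
  decide (o_score < 0)

-- ===== PRECONDITION & SPEC =====
def Spec_m_wins (o_dice : List Int) (m_dice : List Int) (out : Bool) : Prop := out = m_wins_alt o_dice m_dice
instance (o_dice : List Int) (m_dice : List Int) (out : Bool) : Decidable (Spec_m_wins o_dice m_dice out) := by unfold Spec_m_wins; infer_instance

-- ===== CLAIM (what is proved, stated in full; the proofs are below) =====
def Claim_equal_m_wins : Prop := ∀ (o_dice : List Int) (m_dice : List Int), Dom_m_wins o_dice m_dice → Spec_m_wins o_dice m_dice (m_wins o_dice m_dice)

-- ===== LEMMAS AND PROOFS =====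

-- a list whose prefix of length k satisfies p and whose suffix does not has countP = k
theorem countP_eq_of_threshold (xs : List Int) (p : Int → Bool) (k : Nat)
    (hk : k ≤ xs.length)
    (h1 : ∀ (j : Nat) (hj : j < xs.length), j < k → p xs[j])
    (h2 : ∀ (j : Nat) (hj : j < xs.length), k ≤ j → ¬ p xs[j]) :
    xs.countP p = k := by
  induction xs generalizing k with
  | nil => simp only [List.countP_nil]; simp only [List.length_nil] at hk; omega
  | cons x t ih =>
    cases k with
    | zero =>
      simp only [List.countP_cons]
      have hx : ¬ p x := by simpa using h2 0 (by simp) (Nat.zero_le _)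
      have ht : t.countP p = 0 := by
        apply ih 0 (Nat.zero_le _)
        · intro j hj hj0; omega
        · intro j hj _
          simpa using h2 (j+1) (by simpa using Nat.succ_lt_succ hj) (Nat.zero_le _)
      simp [hx, ht]
    | succ k' =>
      have hx : p x := by simpa using h1 0 (by simp) (Nat.succ_pos _)
      have ht : t.countP p = k' := by
        apply ih k' (by simpa using hk)
        · intro j hj hjk
          simpa using h1 (j+1) (by simpa using Nat.succ_lt_succ hj) (Nat.succ_lt_succ hjk)
        · intro j hj hjk
          simpa using h2 (j+1) (by simpa using Nat.succ_lt_succ hj) (Nat.succ_le_succ hjk)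
      simp [hx, ht]

theorem bisectLeft_eq_countP (ms : List Int) (hms : ms.Pairwise (· ≤ ·)) (x : Int) :
    PySem.List.bisectLeft ms x = ms.countP (fun y => y < x) := by
  obtain ⟨hle, h1, h2⟩ := PySem.List.bisectLeft_spec ms x hms
  exact (countP_eq_of_threshold ms _ _ hle
    (fun j hj hjk => by simpa using h1 j hj hjk)
    (fun j hj hjk => by simpa using not_lt.mpr (h2 j hj hjk))).symm

theorem bisectRight_eq_countP (ms : List Int) (hms : ms.Pairwise (· ≤ ·)) (x : Int) :
    PySem.List.bisectRight ms x = ms.countP (fun y => y ≤ x) := by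
  obtain ⟨hle, h1, h2⟩ := PySem.List.bisectRight_spec ms x hms
  exact (countP_eq_of_threshold ms _ _ hle
    (fun j hj hjk => by simpa using h1 j hj hjk)
    (fun j hj hjk => by simpa using not_le.mpr (h2 j hj hjk))).symm

-- A's inner loop over m_dice adds (#{m < o} - #{m > o}) to the accumulator
theorem innerA_eq (o : Int) (m : List Int) :
    ∀ s : Int, m.foldl (fun s m_side =>
        if o > m_side then s + 1 else if o < m_side then s - 1 else s) s
      = s + ((m.countP (fun y => y < o) : Int) - (m.countP (fun y => o < y) : Int)) := by
  induction m with
  | nil => intro s; simp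
  | cons a t ih =>
    intro s
    simp only [List.foldl_cons, List.countP_cons, ih]
    by_cases h1 : a < o
    · have h2 : ¬ o < a := by omega
      simp [h1, h2]; ring
    · by_cases h2 : o < a
      · simp [h1, h2]; ring
      · simp [h1, h2]

-- B's per-o_side increment equals A's per-o_side contribution
theorem step_eq (m_dice : List Int) (o : Int) :
    ((PySem.List.bisectLeft (PySem.List.sorted m_dice (fun x => x)) o : Int)
      - (((PySem.List.sorted m_dice (fun x => x)).length : Int)
          - (PySem.List.bisectRight (PySem.List.sorted m_dice (fun x => x)) o : Int)))
    = ((m_dice.countP (fun y => y < o) : Int) - (m_dice.countP (fun y => o < y) : Int)) := by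
  set ms := PySem.List.sorted m_dice (fun x => x) with hms
  have hpw : ms.Pairwise (· ≤ ·) := by
    simpa using PySem.List.sorted_pairwise (xs := m_dice) (key := fun x => x)
  have hperm : ms.Perm m_dice := PySem.List.sorted_perm m_dice (fun x => x) false
  have hL : PySem.List.bisectLeft ms o = m_dice.countP (fun y => y < o) := by
    rw [bisectLeft_eq_countP ms hpw o]
    exact hperm.countP_congr (fun x _ => rfl)
  have hR : PySem.List.bisectRight ms o = m_dice.countP (fun y => y ≤ o) := by
    rw [bisectRight_eq_countP ms hpw o]
    exact hperm.countP_congr (fun x _ => rfl)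
  have hlen : ms.length = m_dice.length := hperm.length_eq
  have hsplit : m_dice.countP (fun y => y ≤ o) + m_dice.countP (fun y => o < y) = m_dice.length := by
    have := (List.length_eq_countP_add_countP (p := fun y : Int => y ≤ o) (l := m_dice)).symm
    simpa [not_le] using this
  rw [hL, hR, hlen]
  omega

theorem m_wins_eq (o_dice : List Int) (m_dice : List Int) :
    m_wins o_dice m_dice = m_wins_alt o_dice m_dice := by
  unfold m_wins m_wins_alt
  have hf : (fun (s o_side : Int) => m_dice.foldl (fun s m_side =>
        if o_side > m_side then s + 1 else if o_side < m_side then s - 1 else s) s)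
      = (fun (s o : Int) =>
          s + ((PySem.List.bisectLeft (PySem.List.sorted m_dice (fun x => x)) o : Int)
            - (((PySem.List.sorted m_dice (fun x => x)).length : Int)
                - (PySem.List.bisectRight (PySem.List.sorted m_dice (fun x => x)) o : Int)))) := by
    funext s o
    rw [innerA_eq, step_eq]
  simp only [hf]

-- ===== VERDICT (by name: the statement is the Claim_ definition above) =====
theorem m_wins_spec : Claim_equal_m_wins := by
  intro o_dice m_dice _
  unfold Spec_m_wins
  exact m_wins_eq o_dice m_dice
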